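-- pv_equiv track=rewrite | github.com/hanzhenlei767/leetcode | 生成密码序列.py | funtion
-- ===== SOURCE A (Python) =====
-- def funtion(arr,key,arr_len):
--     index = 0
--     last = []
--     for i in range(arr_len):#总密码数
--         temp = 0
--         index = i
--         for _ in range(abs(key)):#生成密码累计加多少次
--             if key > 0:
--                 index -= 1
--                 if index < 0:
--                     index = arr_len -1
--                 temp += arr[index]
--             else:
--                 index += 1
--                 if index == arr_len:
--                     index = 0
--                 temp += arr[index]
--         last.append(temp)
--     return last
-- ===== SOURCE B (Python) =====
-- def funtion(arr, key, arr_len):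
--     # O(arr_len): prefix sums + closed-form full cycles; inner scan over |key| eliminated
--     n = arr_len
--     if n <= 0:
--         return []
--     pre = [0]
--     for j in range(n):
--         pre.append(pre[-1] + arr[j])
--     total = pre[n]
--     q, r = divmod(abs(key), n)
--     out = []
--     for i in range(n):
--         if key > 0:
--             lo = i - r
--             part = pre[i] - pre[lo] if lo >= 0 else pre[i] + total - pre[lo + n]
--         else:
--             hi = i + r
--             part = pre[hi + 1] - pre[i + 1] if hi < n else total - pre[i + 1] + pre[hi + 1 - n]
--         out.append(q * total + part)
--     return out
-- ===== Notes on version B (the rewrite author's own statement) =====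
-- stated objective: faster
-- what changed: Replaced the O(arr_len*|key|) nested loop (stepping one circular index at a time) by an O(arr_len) prefix-sum algorithm: divmod(|key|, arr_len) gives full-cycle count times the total plus a constant-time windowed prefix-sum difference per index.
-- outside the precondition, e.g. on funtion([1, 2], 0, 3): A returns [0, 0, 0], B raises IndexError
import Mathlib
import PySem

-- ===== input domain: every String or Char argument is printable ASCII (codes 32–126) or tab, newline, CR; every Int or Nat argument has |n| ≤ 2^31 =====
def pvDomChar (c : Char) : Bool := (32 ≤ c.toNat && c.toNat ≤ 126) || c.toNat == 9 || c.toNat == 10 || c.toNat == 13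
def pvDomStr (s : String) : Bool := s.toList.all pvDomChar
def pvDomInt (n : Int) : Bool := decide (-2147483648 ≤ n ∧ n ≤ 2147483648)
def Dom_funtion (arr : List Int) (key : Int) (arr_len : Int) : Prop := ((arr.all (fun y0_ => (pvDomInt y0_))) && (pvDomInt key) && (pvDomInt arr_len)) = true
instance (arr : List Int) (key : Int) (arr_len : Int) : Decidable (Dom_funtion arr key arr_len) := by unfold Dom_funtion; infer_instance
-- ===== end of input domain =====

-- B replaces A's O(arr_len*|key|) step-by-step circular walk by an O(arr_len) prefix-sum
-- scheme (full cycles contribute divmod quotient * total, remainder is a window lookup).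

-- ===== PORT A =====
def funtion (arr : List Int) (key : Int) (arr_len : Int) : List Int :=
  (PySem.List.pyRange 0 arr_len 1).foldl (fun last i =>
    let st := (PySem.List.pyRange 0 |key| 1).foldl (fun (st : Int × Int) _ =>
      if key > 0 then
        let index := st.2 - 1
        let index := if index < 0 then arr_len - 1 else index
        (st.1 + PySem.List.pyGetD arr index 0, index)
      else
        let index := st.2 + 1
        let index := if index = arr_len then 0 else index
        (st.1 + PySem.List.pyGetD arr index 0, index)) (0, i)
    last ++ [st.1]) []

-- ===== PORT B =====
def funtion_alt (arr : List Int) (key : Int) (arr_len : Int) : List Int :=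
  if arr_len ≤ 0 then []
  else
    let pre := (PySem.List.pyRange 0 arr_len 1).foldl
      (fun pre j => pre ++ [PySem.List.pyGetD pre (-1) 0 + PySem.List.pyGetD arr j 0]) [0]
    let total := PySem.List.pyGetD pre arr_len 0
    let q := PySem.Int.floordiv |key| arr_len
    let r := PySem.Int.mod |key| arr_len
    (PySem.List.pyRange 0 arr_len 1).foldl (fun out i =>
      let part :=
        if key > 0 then
          let lo := i - r
          if 0 ≤ lo then PySem.List.pyGetD pre i 0 - PySem.List.pyGetD pre lo 0
          else PySem.List.pyGetD pre i 0 + total - PySem.List.pyGetD pre (lo + arr_len) 0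
        else
          let hi := i + r
          if hi < arr_len then PySem.List.pyGetD pre (hi + 1) 0 - PySem.List.pyGetD pre (i + 1) 0
          else total - PySem.List.pyGetD pre (i + 1) 0 + PySem.List.pyGetD pre (hi + 1 - arr_len) 0
      out ++ [q * total + part]) []

-- ===== PRECONDITION & SPEC =====
-- Pre_ excludes arr_len > len(arr): there A raises IndexError whenever key ≠ 0, and in the
-- degenerate key = 0 case (A returns a zero list) B's prefix-sum construction itself raises.
def Pre_funtion (arr : List Int) (key : Int) (arr_len : Int) : Prop :=
  arr_len ≤ (arr.length : Int)
instance (arr : List Int) (key : Int) (arr_len : Int) : Decidable (Pre_funtion arr key arr_len) := by unfold Pre_funtion; infer_instance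
def pvWitness_funtion : List Int × Int × Int := ([1, 2, 3], 2, 3)

def Spec_funtion (arr : List Int) (key : Int) (arr_len : Int) (out : List Int) : Prop := out = funtion_alt arr key arr_len
instance (arr : List Int) (key : Int) (arr_len : Int) (out : List Int) : Decidable (Spec_funtion arr key arr_len out) := by unfold Spec_funtion; infer_instance

-- ===== CLAIM (what is proved, stated in full; the proofs are below) =====
def Claim_equal_funtion : Prop := ∀ (arr : List Int) (key : Int) (arr_len : Int), Dom_funtion arr key arr_len → Pre_funtion arr key arr_len → Spec_funtion arr key arr_len (funtion arr key arr_len)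

-- ===== LEMMAS AND PROOFS =====

-- element access as a total Nat-indexed function (indices used stay in range under Pre_)
def aF (arr : List Int) (j : Nat) : Int := arr.getD j 0

-- prefix sums: preP arr j = arr[0] + … + arr[j-1]
def preP (arr : List Int) : Nat → Int
  | 0 => 0
  | j + 1 => preP arr j + aF arr j

-- A's circular index updates, on Nat, for modulus m
def decF (m j : Nat) : Nat := if j = 0 then m - 1 else j - 1
def incF (m j : Nat) : Nat := if j + 1 = m then 0 else j + 1

-- A's inner loop as structural recursion: t steps from index i, accumulating a (f index)
def iterG (f : Nat → Nat) (a : Nat → Int) (i : Nat) : Nat → Int × Nat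
  | 0 => (0, i)
  | t + 1 => let p := iterG f a i t; (p.1 + a (f p.2), f p.2)

theorem iterG_comp (f : Nat → Nat) (a : Nat → Int) (i : Nat) (t u : Nat) :
    iterG f a i (t + u) =
      ((iterG f a i t).1 + (iterG f a (iterG f a i t).2 u).1,
       (iterG f a (iterG f a i t).2 u).2) := by
  induction u with
  | zero => simp [iterG]
  | succ u ih => simp [iterG, ← Nat.add_assoc, ih]; ring

theorem iterG_snd (m d : Nat) (hm : 0 < m) (f : Nat → Nat)
    (hf : ∀ j, j < m → f j = (j + d) % m) (a : Nat → Int) (i : Nat) (hi : i < m) (t : Nat) :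
    (iterG f a i t).2 = (i + t * d) % m := by
  induction t with
  | zero => simp [iterG, Nat.mod_eq_of_lt hi]
  | succ t ih =>
    simp only [iterG, ih, hf _ (Nat.mod_lt _ hm)]
    rw [Nat.mod_add_mod]
    ring_nf

theorem iterG_snd_lt (m d : Nat) (hm : 0 < m) (f : Nat → Nat)
    (hf : ∀ j, j < m → f j = (j + d) % m) (a : Nat → Int) (i : Nat) (hi : i < m) (t : Nat) :
    (iterG f a i t).2 < m := by
  rw [iterG_snd m d hm f hf a i hi t]; exact Nat.mod_lt _ hm

-- full-cycle sum is invariant along the orbit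
theorem iterG_cycle_const (m d : Nat) (hm : 0 < m) (f : Nat → Nat)
    (hf : ∀ j, j < m → f j = (j + d) % m) (a : Nat → Int) (i : Nat) (hi : i < m) :
    (iterG f a i m).1 = (iterG f a (f i) m).1 := by
  have hfi : f i < m := by rw [hf i hi]; exact Nat.mod_lt _ hm
  have hsplit : m = 1 + (m - 1) := by omega
  have hL : (iterG f a i m).1 = a (f i) + (iterG f a (f i) (m - 1)).1 := by
    rw [hsplit, iterG_comp]; simp [iterG]
  have hsnd : f ((iterG f a (f i) (m - 1)).2) = f i := by
    have hlt := iterG_snd_lt m d hm f hf a (f i) hfi (m - 1)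
    rw [hf _ hlt, iterG_snd m d hm f hf a (f i) hfi (m - 1)]
    rw [Nat.mod_add_mod]
    have he : f i + (m - 1) * d + d = f i + m * d := by
      have hm1 : m - 1 + 1 = m := by omega
      calc f i + (m - 1) * d + d = f i + ((m - 1) + 1) * d := by ring
        _ = f i + m * d := by rw [hm1]
    rw [he, Nat.add_mul_mod_self_left, Nat.mod_eq_of_lt hfi]
  have hR : (iterG f a (f i) m).1 = (iterG f a (f i) (m - 1)).1 + a (f i) := by
    conv_lhs => rw [show m = (m - 1) + 1 from by omega]
    simp [iterG, hsnd]
  omega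

-- descending run without wraparound (for key > 0)
theorem iterG_desc (m : Nat) (hm : 0 < m) (arr : List Int) (i t : Nat) (hti : t ≤ i) (hi : i < m) :
    iterG (decF m) (aF arr) i t = (preP arr i - preP arr (i - t), i - t) := by
  induction t with
  | zero => simp [iterG]
  | succ t ih =>
    have h1 : iterG (decF m) (aF arr) i t = (preP arr i - preP arr (i - t), i - t) :=
      ih (by omega)
    have h2 : decF m (i - t) = i - (t + 1) := by
      have hne : i - t ≠ 0 := by omega
      simp [decF, hne]; omega
    have h4 : preP arr (i - t) = preP arr (i - (t + 1)) + aF arr (i - (t + 1)) := by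
      rw [show i - t = (i - (t + 1)) + 1 from by omega, preP]
    simp only [iterG, h1, h2, Prod.mk.injEq]
    refine ⟨?_, trivial⟩
    rw [h4]; ring

-- ascending run without wraparound (for key < 0)
theorem iterG_asc (m : Nat) (hm : 0 < m) (arr : List Int) (i t : Nat) (hti : i + t < m) :
    iterG (incF m) (aF arr) i t = (preP arr (i + t + 1) - preP arr (i + 1), i + t) := by
  induction t with
  | zero => simp [iterG]
  | succ t ih =>
    have h1 : iterG (incF m) (aF arr) i t = (preP arr (i + t + 1) - preP arr (i + 1), i + t) :=
      ih (by omega)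
    have h2 : incF m (i + t) = i + t + 1 := by
      have hne : i + t + 1 ≠ m := by omega
      simp [incF, hne]
    have h4 : preP arr (i + (t + 1) + 1) = preP arr (i + t + 1) + aF arr (i + t + 1) := by
      rw [show i + (t + 1) + 1 = (i + t + 1) + 1 from by omega, preP]
    simp only [iterG, h1, h2, Prod.mk.injEq]
    exact ⟨by rw [h4]; ring, by omega⟩

theorem decF_eq_mod (m : Nat) (hm : 0 < m) (j : Nat) (hj : j < m) :
    decF m j = (j + (m - 1)) % m := by
  unfold decF
  by_cases h0 : j = 0
  · simp [h0, Nat.mod_eq_of_lt (show m - 1 < m by omega)]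
  · have h1 : j + (m - 1) = m + (j - 1) := by omega
    simp only [h0, if_false, h1, Nat.add_mod_left]
    rw [Nat.mod_eq_of_lt (by omega)]

theorem incF_eq_mod (m : Nat) (hm : 0 < m) (j : Nat) (hj : j < m) :
    incF m j = (j + 1) % m := by
  unfold incF
  by_cases h0 : j + 1 = m
  · simp [h0]
  · rw [if_neg h0, Nat.mod_eq_of_lt (by omega)]

theorem cycle_dec (m : Nat) (hm : 0 < m) (arr : List Int) (i : Nat) (hi : i < m) :
    (iterG (decF m) (aF arr) i m).1 = preP arr m := by
  induction i with
  | zero =>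
    have hc := iterG_comp (decF m) (aF arr) 0 1 (m - 1)
    rw [show (1 : Nat) + (m - 1) = m from by omega] at hc
    rw [hc]
    have h2 : iterG (decF m) (aF arr) 0 1 = (aF arr (m - 1), m - 1) := by
      simp [iterG, decF]
    rw [h2]
    have h3 := iterG_desc m hm arr (m - 1) (m - 1) (le_refl _) (by omega)
    rw [h3]
    simp only []
    have h4 : preP arr m = preP arr (m - 1) + aF arr (m - 1) := by
      conv_lhs => rw [show m = (m - 1) + 1 from by omega]
      rw [preP]
    rw [h4]; simp [preP]
    ring
  | succ i ih =>
    have hconst := iterG_cycle_const m (m - 1) hm (decF m) (decF_eq_mod m hm) (aF arr) (i + 1) hi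
    have hd : decF m (i + 1) = i := by simp [decF]
    rw [hconst, hd, ih (by omega)]

theorem cycle_inc (m : Nat) (hm : 0 < m) (arr : List Int) (i : Nat) (hi : i < m) :
    (iterG (incF m) (aF arr) i m).1 = preP arr m := by
  induction i with
  | zero =>
    have h1 : (m - 1) + 1 = m := by omega
    have hc := iterG_comp (incF m) (aF arr) 0 (m - 1) 1
    rw [h1] at hc
    rw [hc]
    have h2 := iterG_asc m hm arr 0 (m - 1) (by omega)
    rw [h2]
    have h3 : incF m (m - 1) = 0 := by unfold incF; simp [h1]
    simp only [iterG, h3]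
    have h5 : preP arr 1 = aF arr 0 := by simp [preP]
    simp only [Nat.zero_add, h5, h3]
    rw [h1]
    ring
  | succ i ih =>
    have hconst := iterG_cycle_const m 1 hm (incF m) (incF_eq_mod m hm) (aF arr) i (by omega)
    have hd : incF m i = i + 1 := by unfold incF; rw [if_neg (by omega)]
    rw [← hd, ← hconst, ih (by omega)]

-- q full cycles plus remainder
theorem iterG_cycles (m d : Nat) (hm : 0 < m) (f : Nat → Nat)
    (hf : ∀ j, j < m → f j = (j + d) % m) (arr : List Int)
    (hcyc : ∀ j, j < m → (iterG f (aF arr) j m).1 = preP arr m)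
    (i : Nat) (hi : i < m) (q r : Nat) :
    (iterG f (aF arr) i (q * m + r)).1 = q * preP arr m + (iterG f (aF arr) i r).1 := by
  induction q with
  | zero => simp
  | succ q ih =>
    have hsnd := iterG_snd_lt m d hm f hf (aF arr) i hi (q * m + r)
    have : (q + 1) * m + r = (q * m + r) + m := by ring
    rw [this, iterG_comp, hcyc _ hsnd, ih]
    push_cast; ring

-- window formula, decreasing direction
theorem window_dec (m : Nat) (hm : 0 < m) (arr : List Int) (i r : Nat) (hi : i < m) (hr : r < m) :
    (iterG (decF m) (aF arr) i r).1 =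
      if r ≤ i then preP arr i - preP arr (i - r)
      else preP arr i + preP arr m - preP arr (m + i - r) := by
  by_cases hri : r ≤ i
  · rw [if_pos hri, iterG_desc m hm arr i r hri hi]
  · rw [if_neg hri]
    have hu : r = (i + 1) + (r - i - 1) := by omega
    rw [hu, iterG_comp]
    have hstep : iterG (decF m) (aF arr) i (i + 1) = (preP arr i + aF arr (m - 1), m - 1) := by
      rw [iterG_comp (decF m) (aF arr) i i 1]
      rw [iterG_desc m hm arr i i (le_refl _) hi]
      simp [iterG, decF, preP]
    rw [hstep]
    have hdesc := iterG_desc m hm arr (m - 1) (r - i - 1) (by omega) (by omega)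
    rw [hdesc]
    have ha : aF arr (m - 1) = preP arr m - preP arr (m - 1) := by
      rw [show m = (m - 1) + 1 from by omega, preP]; ring_nf; simp
    have he : m - 1 - (r - i - 1) = m + i - r := by omega
    simp only [ha, he]
    rw [show m + i - (i + 1 + (r - i - 1)) = m + i - r from by omega]
    ring

-- window formula, increasing direction
theorem window_inc (m : Nat) (hm : 0 < m) (arr : List Int) (i r : Nat) (hi : i < m) (hr : r < m) :
    (iterG (incF m) (aF arr) i r).1 =
      if i + r < m then preP arr (i + r + 1) - preP arr (i + 1)
      else preP arr m - preP arr (i + 1) + preP arr (i + r + 1 - m) := by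
  by_cases hir : i + r < m
  · rw [if_pos hir, iterG_asc m hm arr i r hir]
  · rw [if_neg hir]
    have hu : r = (m - 1 - i) + (1 + (r - (m - 1 - i) - 1)) := by omega
    rw [hu, iterG_comp]
    rw [iterG_asc m hm arr i (m - 1 - i) (by omega)]
    simp only []
    have h1 : i + (m - 1 - i) = m - 1 := by omega
    rw [h1, iterG_comp]
    have h2 : incF m (m - 1) = 0 := by unfold incF; rw [if_pos (by omega)]
    have hstep : iterG (incF m) (aF arr) (m - 1) 1 = (aF arr 0, 0) := by
      simp [iterG, h2]
    rw [hstep]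
    rw [iterG_asc m hm arr 0 (r - (m - 1 - i) - 1) (by omega)]
    have ha : aF arr 0 = preP arr 1 := by simp [preP]
    have he : 0 + (r - (m - 1 - i) - 1) + 1 = i + r + 1 - m := by omega
    have hm1 : m - 1 + 1 = m := by omega
    simp only [ha, he, hm1]
    rw [show i + (m - 1 - i + (1 + (r - (m - 1 - i) - 1))) + 1 - m = i + r + 1 - m from by omega,
        show (0:Nat) + 1 = 1 from rfl]
    ring

-- a fold that ignores the list elements is function iteration
theorem foldl_ignore {α β : Type} (g : β → β) (l : List α) (init : β) :
    l.foldl (fun s _ => g s) init = g^[l.length] init := by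
  induction l generalizing init with
  | nil => rfl
  | cons x xs ih => simp [List.foldl_cons, ih, Function.iterate_succ_apply]

-- A's inner-loop body as a named function (same term as in the port)
def stepAFn (arr : List Int) (key arr_len : Int) (st : Int × Int) : Int × Int :=
  if key > 0 then
    let index := st.2 - 1
    let index := if index < 0 then arr_len - 1 else index
    (st.1 + PySem.List.pyGetD arr index 0, index)
  else
    let index := st.2 + 1
    let index := if index = arr_len then 0 else index
    (st.1 + PySem.List.pyGetD arr index 0, index)

theorem inner_eq (arr : List Int) (key arr_len : Int) (i : Int) :
    (PySem.List.pyRange 0 |key|).foldl (fun (st : Int × Int) _ =>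
      if key > 0 then
        let index := st.2 - 1
        let index := if index < 0 then arr_len - 1 else index
        (st.1 + PySem.List.pyGetD arr index 0, index)
      else
        let index := st.2 + 1
        let index := if index = arr_len then 0 else index
        (st.1 + PySem.List.pyGetD arr index 0, index)) (0, i)
      = (stepAFn arr key arr_len)^[key.natAbs] (0, i) := by
  rw [show (fun (st : Int × Int) (_ : Int) =>
      if key > 0 then
        let index := st.2 - 1
        let index := if index < 0 then arr_len - 1 else index
        (st.1 + PySem.List.pyGetD arr index 0, index)
      else
        let index := st.2 + 1
        let index := if index = arr_len then 0 else index
        (st.1 + PySem.List.pyGetD arr index 0, index))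
      = (fun (st : Int × Int) (_ : Int) => stepAFn arr key arr_len st) from rfl]
  rw [foldl_ignore, PySem.List.length_pyRange_one]
  congr 1
  rw [Int.sub_zero, Int.abs_eq_natAbs, Int.toNat_natCast]

theorem bridgeA_dec (arr : List Int) (key arr_len : Int) (m : Nat) (hm : 0 < m)
    (hmn : (m : Int) = arr_len) (hkey : key > 0) (t : Nat) (s : Int) (j : Nat) (hj : j < m) :
    (stepAFn arr key arr_len)^[t] (s, (j : Int))
      = (s + (iterG (decF m) (aF arr) j t).1, ((iterG (decF m) (aF arr) j t).2 : Int)) := by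
  induction t with
  | zero => simp [iterG]
  | succ t ih =>
    rw [Function.iterate_succ_apply', ih]
    have hlt := iterG_snd_lt m (m - 1) hm (decF m) (decF_eq_mod m hm) (aF arr) j hj t
    set j' := (iterG (decF m) (aF arr) j t).2 with hj'
    simp only [iterG, stepAFn, if_pos hkey, ← hj']
    by_cases h0 : j' = 0
    · have hidx : ((j' : Int) - 1 < 0) := by omega
      rw [if_pos hidx]
      have hcast : arr_len - 1 = ((m - 1 : Nat) : Int) := by omega
      have hdec : decF m j' = m - 1 := by simp [decF, h0]
      rw [hcast, hdec, PySem.List.pyGetD_natCast]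
      simp [aF, add_assoc]
    · have hidx : ¬ ((j' : Int) - 1 < 0) := by omega
      rw [if_neg hidx]
      have hcast : (j' : Int) - 1 = ((j' - 1 : Nat) : Int) := by omega
      have hdec : decF m j' = j' - 1 := by simp [decF, h0]
      rw [hcast, hdec, PySem.List.pyGetD_natCast]
      simp [aF, add_assoc]

theorem bridgeA_inc (arr : List Int) (key arr_len : Int) (m : Nat) (hm : 0 < m)
    (hmn : (m : Int) = arr_len) (hkey : ¬ key > 0) (t : Nat) (s : Int) (j : Nat) (hj : j < m) :
    (stepAFn arr key arr_len)^[t] (s, (j : Int))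
      = (s + (iterG (incF m) (aF arr) j t).1, ((iterG (incF m) (aF arr) j t).2 : Int)) := by
  induction t with
  | zero => simp [iterG]
  | succ t ih =>
    rw [Function.iterate_succ_apply', ih]
    have hlt := iterG_snd_lt m 1 hm (incF m) (incF_eq_mod m hm) (aF arr) j hj t
    set j' := (iterG (incF m) (aF arr) j t).2 with hj'
    simp only [iterG, stepAFn, if_neg hkey, ← hj']
    by_cases h0 : j' + 1 = m
    · have hidx : ((j' : Int) + 1 = arr_len) := by omega
      rw [if_pos hidx]
      have hinc : incF m j' = 0 := by simp [incF, h0]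
      rw [hinc]
      have : ((0 : Nat) : Int) = 0 := rfl
      rw [show ((0 : Int)) = ((0 : Nat) : Int) from rfl, PySem.List.pyGetD_natCast]
      simp [aF, add_assoc]
    · have hidx : ¬ ((j' : Int) + 1 = arr_len) := by omega
      rw [if_neg hidx]
      have hcast : (j' : Int) + 1 = ((j' + 1 : Nat) : Int) := by omega
      have hinc : incF m j' = j' + 1 := by simp [incF, h0]
      rw [hcast, hinc, PySem.List.pyGetD_natCast]
      simp [aF, add_assoc]

theorem preList_eq (arr : List Int) (c : Nat) :
    (PySem.List.pyRange 0 (c : Int)).foldl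
      (fun pre j => pre ++ [PySem.List.pyGetD pre (-1) 0 + PySem.List.pyGetD arr j 0]) [0]
      = (List.range (c + 1)).map (preP arr) := by
  induction c with
  | zero =>
    rw [PySem.List.pyRange_one_eq_nil (by omega)]
    simp [preP]
  | succ c ih =>
    rw [show ((c + 1 : Nat) : Int) = (c : Int) + 1 from by push_cast; ring]
    rw [PySem.List.pyRange_one_succ_right (by positivity), List.foldl_append, ih]
    simp only [List.foldl_cons, List.foldl_nil]
    have hlast : PySem.List.pyGetD ((List.range (c + 1)).map (preP arr)) (-1) 0 = preP arr c := by
      rw [List.range_succ, List.map_append]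
      exact PySem.List.pyGetD_neg_one_append_singleton _ _ _
    rw [hlast, PySem.List.pyGetD_natCast]
    conv_rhs => rw [List.range_succ, List.map_append]
    simp [preP, aF]

theorem preLookup (arr : List Int) (m : Nat) (x : Int) (h0 : 0 ≤ x) (h1 : x ≤ (m : Int)) :
    PySem.List.pyGetD ((List.range (m + 1)).map (preP arr)) x 0 = preP arr x.toNat := by
  rw [PySem.List.pyGetD_eq_getElem _ 0 h0 (by simp; omega)]
  simp only [List.getElem_map, List.getElem_range]

-- ===== VERDICT (by name: the statement is the Claim_ definition above) =====
theorem funtion_spec : Claim_equal_funtion := by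
  intro arr key arr_len _ hpre
  unfold Spec_funtion funtion funtion_alt
  by_cases hn : arr_len ≤ 0
  · rw [if_pos hn, PySem.List.pyRange_one_eq_nil hn]
    rfl
  · rw [if_neg hn]
    have hm : 0 < arr_len.toNat := by omega
    have hmn : ((arr_len.toNat : Nat) : Int) = arr_len := by omega
    set m := arr_len.toNat with hmdef
    have hpl := preList_eq arr m
    rw [hmn] at hpl
    simp only [inner_eq, hpl]
    rw [PySem.List.foldl_append_singleton_eq_map
          (fun i => ((stepAFn arr key arr_len)^[key.natAbs] ((0 : Int), i)).1),
        PySem.List.foldl_append_singleton_eq_map]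
    simp only [List.nil_append]
    apply List.map_congr_left
    intro i hi
    rw [PySem.List.mem_pyRange_one] at hi
    obtain ⟨h0i, h1i⟩ := hi
    have hii : ((i.toNat : Nat) : Int) = i := by omega
    have him : i.toNat < m := by omega
    set i' := i.toNat with hi'
    set k := key.natAbs with hk
    have hkm : k % m < m := Nat.mod_lt _ hm
    have hsplitk : k = (k / m) * m + k % m := by
      have h := Nat.div_add_mod k m
      rw [Nat.mul_comm] at h
      omega
    have habs : |key| = ((k : Nat) : Int) := by rw [hk, Int.abs_eq_natAbs]
    have htot : PySem.List.pyGetD ((List.range (m + 1)).map (preP arr)) arr_len 0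
        = preP arr m := by
      rw [preLookup arr m arr_len (by omega) (by omega)]
    have hq : PySem.Int.floordiv |key| arr_len = ((k / m : Nat) : Int) := by
      rw [habs, ← hmn, PySem.Int.floordiv_natCast]
    have hr : PySem.Int.mod |key| arr_len = ((k % m : Nat) : Int) := by
      rw [habs, ← hmn, PySem.Int.mod_natCast]
    rw [htot, hq, hr]
    by_cases hkey : key > 0
    · -- decreasing direction
      rw [← hii, bridgeA_dec arr key arr_len m hm hmn hkey k 0 i' him]
      simp only [zero_add]
      rw [show iterG (decF m) (aF arr) i' k = iterG (decF m) (aF arr) i' ((k / m) * m + k % m)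
            from by rw [← hsplitk],
          iterG_cycles m (m - 1) hm (decF m) (decF_eq_mod m hm) arr (cycle_dec m hm arr) i' him,
          window_dec m hm arr i' (k % m) him hkm]
      rw [if_pos hkey]
      by_cases hlo : (0 : Int) ≤ (i' : Int) - ((k % m : Nat) : Int)
      · rw [if_pos hlo, if_pos (show k % m ≤ i' by omega)]
        rw [preLookup arr m (i' : Int) (by omega) (by omega),
            preLookup arr m _ (by omega) (by omega)]
        rw [show ((i' : Int) - ((k % m : Nat) : Int)).toNat = i' - k % m from by omega,
            Int.toNat_natCast]
      · rw [if_neg hlo, if_neg (show ¬ k % m ≤ i' by omega)]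
        rw [preLookup arr m (i' : Int) (by omega) (by omega),
            preLookup arr m _ (by omega) (by omega)]
        rw [show ((i' : Int) - ((k % m : Nat) : Int) + arr_len).toNat = m + i' - k % m from by omega,
            Int.toNat_natCast]
    · -- increasing direction
      rw [← hii, bridgeA_inc arr key arr_len m hm hmn hkey k 0 i' him]
      simp only [zero_add]
      rw [show iterG (incF m) (aF arr) i' k = iterG (incF m) (aF arr) i' ((k / m) * m + k % m)
            from by rw [← hsplitk],
          iterG_cycles m 1 hm (incF m) (incF_eq_mod m hm) arr (cycle_inc m hm arr) i' him,
          window_inc m hm arr i' (k % m) him hkm]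
      rw [if_neg hkey]
      by_cases hhi : (i' : Int) + ((k % m : Nat) : Int) < arr_len
      · rw [if_pos hhi, if_pos (show i' + k % m < m by omega)]
        rw [preLookup arr m _ (by omega) (by omega),
            preLookup arr m _ (by omega) (by omega)]
        rw [show ((i' : Int) + ((k % m : Nat) : Int) + 1).toNat = i' + k % m + 1 from by omega,
            show ((i' : Int) + 1).toNat = i' + 1 from by omega]
      · rw [if_neg hhi, if_neg (show ¬ i' + k % m < m by omega)]
        rw [preLookup arr m _ (by omega) (by omega),
            preLookup arr m _ (by omega) (by omega)]
        rw [show ((i' : Int) + 1).toNat = i' + 1 from by omega,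
            show ((i' : Int) + ((k % m : Nat) : Int) + 1 - arr_len).toNat = i' + k % m + 1 - m from by omega]
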